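-- pv_equiv track=rewrite | github.com/biancaDanci/CBA | Analysis/Clustering.py | check_interconnection
-- ===== SOURCE A (Python) =====
-- def check_interconnection(clusters_text):
--     list_of_interconnection = []
--
--     for elem in clusters_text:
--         found = 0
--         for text_elem in elem:
--             for i in range(0, len(clusters_text)):
--                 if not clusters_text.index(elem) == i and text_elem in clusters_text[i]:
--                     found = found+1
--         list_of_interconnection.append(found)
--
--     return list_of_interconnection.index(max(list_of_interconnection))
-- ===== SOURCE B (Python) =====
-- def check_interconnection(clusters_text):
--     # inverted index: text -> number of clusters containing it
--     containing = {}
--     for cluster in clusters_text: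
--         for t in set(cluster):
--             containing[t] = containing.get(t, 0) + 1
--     scores = [sum(containing[t] - 1 for t in cluster) for cluster in clusters_text]
--     return scores.index(max(scores))
-- ===== Notes on version B (the rewrite author's own statement) =====
-- stated objective: faster
-- what changed: Replaces A's triple nested loop with repeated list.index calls by a single-pass inverted index (text -> number of clusters containing it) from which each cluster's score is a sum of precomputed counts.
import Mathlib
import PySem

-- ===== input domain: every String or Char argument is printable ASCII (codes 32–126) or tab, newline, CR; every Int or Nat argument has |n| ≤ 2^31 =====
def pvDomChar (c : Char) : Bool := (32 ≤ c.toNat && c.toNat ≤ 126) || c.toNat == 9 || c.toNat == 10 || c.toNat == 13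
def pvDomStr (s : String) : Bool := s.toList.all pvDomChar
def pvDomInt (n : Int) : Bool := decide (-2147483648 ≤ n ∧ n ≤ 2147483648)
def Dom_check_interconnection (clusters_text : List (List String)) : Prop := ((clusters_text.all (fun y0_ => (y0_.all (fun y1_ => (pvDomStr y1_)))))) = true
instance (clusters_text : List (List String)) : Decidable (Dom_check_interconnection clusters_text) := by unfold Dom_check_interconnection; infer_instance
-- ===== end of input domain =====

-- B replaces A's triple nested loops (with repeated list.index and membership scans) by a
-- one-pass inverted index text -> number-of-containing-clusters; objective: faster.


-- ===== PORT A =====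
def check_interconnection (clusters_text : List (List String)) : Int :=
  let list_of_interconnection : List Int :=
    clusters_text.foldl (fun acc elem =>
      let found : Int :=
        elem.foldl (fun found text_elem =>
          (PySem.List.pyRange 0 (PySem.List.len clusters_text) 1).foldl (fun found i =>
            if ¬ ((PySem.List.index? clusters_text elem).map (fun k => Int.ofNat k) = some i) ∧
               text_elem ∈ PySem.List.pyGetD clusters_text i []
            then found + 1 else found) found) 0
      acc ++ [found]) []
  -- list_of_interconnection.index(max(list_of_interconnection)); none = ValueError on [], excluded by Pre_
  (((PySem.List.max? list_of_interconnection (fun x => x)).bind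
      (fun m => (PySem.List.index? list_of_interconnection m).map (fun k => Int.ofNat k))).getD 0)

-- ===== PORT B =====
def check_interconnection_alt (clusters_text : List (List String)) : Int :=
  let containing : PySem.Dict String Int :=
    clusters_text.foldl (fun d cluster =>
      (PySem.Set.ofList cluster).foldl (fun d t => d.insert t (d.getD t 0 + 1)) d)
      PySem.Dict.empty
  let scores : List Int :=
    clusters_text.map (fun cluster => (cluster.map (fun t => containing.getD t 0 - 1)).sum)
  -- scores.index(max(scores)); none = ValueError on [], excluded by Pre_
  (((PySem.List.max? scores (fun x => x)).bind
      (fun m => (PySem.List.index? scores m).map (fun k => Int.ofNat k))).getD 0)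

-- ===== PRECONDITION & SPEC =====
-- Pre_ excludes only the empty list, on which Python's max([]) raises ValueError in A (and in B).
def Pre_check_interconnection (clusters_text : List (List String)) : Prop := clusters_text ≠ []
instance (clusters_text : List (List String)) : Decidable (Pre_check_interconnection clusters_text) := by unfold Pre_check_interconnection; infer_instance
def pvWitness_check_interconnection : List (List String) := [["a", "b"], ["b"], ["c"]]

def Spec_check_interconnection (clusters_text : List (List String)) (out : Int) : Prop := out = check_interconnection_alt clusters_text
instance (clusters_text : List (List String)) (out : Int) : Decidable (Spec_check_interconnection clusters_text out) := by unfold Spec_check_interconnection; infer_instance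

-- ===== CLAIM (what is proved, stated in full; the proofs are below) =====
def Claim_equal_check_interconnection : Prop := ∀ (clusters_text : List (List String)), Dom_check_interconnection clusters_text → Pre_check_interconnection clusters_text → Spec_check_interconnection clusters_text (check_interconnection clusters_text)

-- ===== LEMMAS AND PROOFS =====

-- counting over indices equals counting over elements
theorem pv_countP_range {α : Type} (xs : List α) (d : α) (q : α → Bool) :
    (List.range xs.length).countP (fun k => q (xs.getD k d)) = xs.countP q := by
  induction xs with
  | nil => simp
  | cons x xs ih =>
    rw [List.length_cons, List.range_succ_eq_map, List.countP_cons, List.countP_map]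
    simp only [Function.comp_def, List.getD_cons_succ, List.getD_cons_zero, List.countP_cons]
    rw [ih]

-- split a countP by an auxiliary predicate
theorem pv_countP_split (l : List Nat) (p f : Nat → Bool) :
    l.countP f = l.countP (fun k => p k && f k) + l.countP (fun k => !p k && f k) := by
  induction l with
  | nil => simp
  | cons x l ih =>
    simp only [List.countP_cons, ih]
    cases hp : p x <;> cases hf : f x <;> simp <;> omega

-- in a duplicate-free list containing j, the conjunct 'k = j' selects exactly one element
theorem pv_countP_eq_single (l : List Nat) (j : Nat) (f : Nat → Bool)
    (hnd : l.Nodup) (hj : j ∈ l) :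
    l.countP (fun k => decide (j = k) && f k) = if f j then 1 else 0 := by
  induction l with
  | nil => simp at hj
  | cons x l ih =>
    simp only [List.nodup_cons] at hnd
    rcases List.mem_cons.mp hj with h | h
    · subst h
      rw [List.countP_cons]
      have hz : l.countP (fun k => decide (j = k) && f k) = 0 := by
        apply List.countP_eq_zero.mpr
        intro k hk
        simp only [Bool.and_eq_true, decide_eq_true_eq, not_and]
        rintro rfl
        exact absurd hk hnd.1
      rw [hz]
      cases hf : f j <;> simp
    · have hxj : ¬ (j = x) := fun e => absurd (e ▸ h) hnd.1
      rw [List.countP_cons, ih hnd.2 h]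
      simp [hxj]

-- A's inner double count for one text of a cluster that occurs in the list:
-- every index except the (always matching) first occurrence of elem contributes
theorem pv_inner (clusters : List (List String)) (elem : List String) (t : String) (f : Int)
    (helem : elem ∈ clusters) (ht : t ∈ elem) :
    ((PySem.List.pyRange 0 (PySem.List.len clusters) 1).foldl (fun found i =>
        if ¬ ((PySem.List.index? clusters elem).map (fun k => Int.ofNat k) = some i) ∧
           t ∈ PySem.List.pyGetD clusters i []
        then found + 1 else found) f)
      = f + ((clusters.countP (fun cl => decide (t ∈ cl)) : Int) - 1) := by
  obtain ⟨j, hj⟩ := Option.isSome_iff_exists.mp ((PySem.List.index?_isSome_iff clusters elem).mpr helem)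
  obtain ⟨hjlt, hje, -⟩ := PySem.List.getElem_of_index?_eq_some hj
  rw [PySem.List.foldl_ite_add_one, PySem.List.len_eq, PySem.List.pyRange_zero_nat, List.countP_map]
  simp only [hj, Option.map_some, Function.comp_def, PySem.List.pyGetD_natCast,
    Option.some.injEq, Int.ofNat_eq_natCast, Nat.cast_inj, Bool.decide_and, decide_not]
  have hpos : 0 < clusters.countP (fun cl => decide (t ∈ cl)) :=
    List.countP_pos_iff.mpr ⟨elem, helem, by simpa using ht⟩
  have hsplit := pv_countP_split (List.range clusters.length)
      (fun k => decide (j = k)) (fun k => decide (t ∈ clusters.getD k []))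
  have hone := pv_countP_eq_single (List.range clusters.length) j
      (fun k => decide (t ∈ clusters.getD k [])) List.nodup_range (List.mem_range.mpr hjlt)
  have hall := pv_countP_range clusters [] (fun cl => decide (t ∈ cl))
  simp only [List.getD_eq_getElem _ _ hjlt, hje, ht, decide_true, if_true] at hone
  omega

-- B's dict counts, for each text, the number of clusters containing it
theorem pv_dict_count (clusters : List (List String)) (t : String)
    (d : PySem.Dict String Int) :
    (clusters.foldl (fun d cluster =>
        (PySem.Set.ofList cluster).foldl (fun d t => d.insert t (d.getD t 0 + 1)) d) d).getD t 0
      = d.getD t 0 + (clusters.countP (fun cl => decide (t ∈ cl)) : Int) := by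
  induction clusters generalizing d with
  | nil => simp
  | cons c cs ih =>
    rw [List.foldl_cons, ih, PySem.Dict.getD_foldl_insert_add_one, List.countP_cons]
    have hc : (PySem.Set.ofList c).count t = if t ∈ c then 1 else 0 := by
      by_cases h : t ∈ c
      · rw [if_pos h]
        exact List.count_eq_one_of_mem (PySem.Set.nodup_ofList c) ((PySem.Set.mem_ofList c t).mpr h)
      · rw [if_neg h]
        exact List.count_eq_zero.mpr (fun hm => h ((PySem.Set.mem_ofList c t).mp hm))
    rw [hc]
    by_cases h : t ∈ c <;> simp [h]; ring

-- A's interconnection list equals B's score list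
theorem pv_lists_eq (clusters : List (List String)) :
    (clusters.foldl (fun acc elem =>
      acc ++ [elem.foldl (fun found text_elem =>
          (PySem.List.pyRange 0 (PySem.List.len clusters) 1).foldl (fun found i =>
            if ¬ ((PySem.List.index? clusters elem).map (fun k => Int.ofNat k) = some i) ∧
               text_elem ∈ PySem.List.pyGetD clusters i []
            then found + 1 else found) found) (0 : Int)]) [])
    = clusters.map (fun cluster => (cluster.map (fun t =>
        (clusters.foldl (fun d cluster =>
          (PySem.Set.ofList cluster).foldl (fun d t => d.insert t (d.getD t 0 + 1)) d)
          PySem.Dict.empty).getD t 0 - 1)).sum) := by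
  rw [PySem.List.foldl_append_singleton_eq_map, List.nil_append]
  apply List.map_congr_left
  intro elem helem
  have hcongr := PySem.List.foldl_congr_mem' elem
    (fun found text_elem =>
      (PySem.List.pyRange 0 (PySem.List.len clusters) 1).foldl (fun found i =>
        if ¬ ((PySem.List.index? clusters elem).map (fun k => Int.ofNat k) = some i) ∧
           text_elem ∈ PySem.List.pyGetD clusters i []
        then found + 1 else found) found)
    (fun found t => found + ((clusters.countP (fun cl => decide (t ∈ cl)) : Int) - 1)) 0
    (fun t ht found => pv_inner clusters elem t found helem ht)
  rw [hcongr, PySem.List.foldl_add]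
  simp only [pv_dict_count, PySem.Dict.getD_empty, zero_add]

-- ===== VERDICT (by name: the statement is the Claim_ definition above) =====
theorem check_interconnection_spec : Claim_equal_check_interconnection := by
  intro clusters _ _
  unfold Spec_check_interconnection check_interconnection check_interconnection_alt
  rw [pv_lists_eq]
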